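-- pv_equiv track=rewrite | github.com/THEGREATCJPark/signal-ai | systems/generic-source-grounded-memory-current-best-20260413/retrieval_variant_harness/evaluate_generic_memory_retrieval_variants.py | select_variant_key
-- ===== SOURCE A (Python) =====
-- from typing import Any
--
-- def select_variant_key(results: dict[str, dict[str, Any]]) -> str:
--     """Select a report key, not an internal patch result name.
--
--     Patch-style variants keep provenance in their inner `variant` field
--     (`coverage_patch_from_raw_leaf`, `iterative_coverage_loop_from_raw_leaf`),
--     but report consumers need a key that exists in `report["variants"]`.
--     """
--     best_count = max(result["passed_count"] for result in results.values())
--     if results.get("ultimate_rrf", {}).get("passed_count") == best_count: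
--         return "ultimate_rrf"
--     return max(
--         results.items(),
--         key=lambda item: (
--             item[1]["passed_count"],
--             item[0] == "coverage_patch",
--             item[0] == "iterative_coverage_loop",
--             item[0],
--         ),
--     )[0]
-- ===== SOURCE B (Python) =====
-- def select_variant_key(results):
--     """Select a report variant key: one pass keeping the best-ranked item.
--
--     The rank tuple puts the `ultimate_rrf` flag right after `passed_count`,
--     so it wins exactly when it attains the maximal passed_count, like the
--     original's explicit guard.
--     """
--     best_key = None
--     best_rank = None
--     for key, result in results.items():
--         rank = (
--             result["passed_count"],
--             key == "ultimate_rrf",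
--             key == "coverage_patch",
--             key == "iterative_coverage_loop",
--             key,
--         )
--         if best_rank is None or best_rank < rank:
--             best_key, best_rank = key, rank
--     if best_key is None:
--         raise ValueError("empty results")
--     return best_key
-- ===== Notes on version B (the rewrite author's own statement) =====
-- stated objective: simpler
-- what changed: Replaces the two max passes and the ultimate_rrf guard with one explicit loop over items that keeps the best (key, rank-tuple) pair, the ultimate_rrf flag sitting right after passed_count in the rank tuple.
import Mathlib
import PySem

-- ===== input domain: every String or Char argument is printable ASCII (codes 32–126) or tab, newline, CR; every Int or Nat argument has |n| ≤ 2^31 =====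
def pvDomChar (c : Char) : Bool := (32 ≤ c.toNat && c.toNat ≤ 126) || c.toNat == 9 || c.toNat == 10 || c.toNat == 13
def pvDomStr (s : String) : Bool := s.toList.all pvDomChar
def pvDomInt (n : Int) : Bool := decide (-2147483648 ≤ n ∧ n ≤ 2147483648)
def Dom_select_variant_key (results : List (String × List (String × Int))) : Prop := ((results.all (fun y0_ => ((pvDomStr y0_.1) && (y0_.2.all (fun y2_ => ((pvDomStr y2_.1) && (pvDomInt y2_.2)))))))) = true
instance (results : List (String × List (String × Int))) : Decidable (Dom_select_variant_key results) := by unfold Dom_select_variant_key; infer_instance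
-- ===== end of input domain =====

-- B replaces A's two max passes and the ultimate_rrf guard by one explicit best-so-far loop
-- over the items (objective: simpler, one pass). Equivalence is about the return value only.

-- ===== PORT A =====

-- result["passed_count"]: first-match dict lookup; total form exact under Pre_ (key present)
def pvCnt (it : String × List (String × Int)) : Int := (it.2.lookup "passed_count").getD 0

-- the last three components of A's key tuple (and of B's rank tuple)
def pvTail3 (k : String) : Bool × Bool × String :=
  (k == "coverage_patch", k == "iterative_coverage_loop", k)

-- lexicographic '<' on (Bool, Bool, str) tuples, as Python compares them (False < True)
def pvLt3 (a b : Bool × Bool × String) : Bool :=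
  (!a.1 && b.1) || (a.1 == b.1 && ((!a.2.1 && b.2.1) || (a.2.1 == b.2.1 && decide (a.2.2 < b.2.2))))

-- A's key: (item[1]["passed_count"], item[0]=="coverage_patch", item[0]=="iterative_coverage_loop", item[0])
def pvKeyA (it : String × List (String × Int)) : Int × Bool × Bool × String :=
  (pvCnt it, pvTail3 it.1)

-- lexicographic '<' on A's 4-tuples
def pvLt4 (a b : Int × Bool × Bool × String) : Bool :=
  decide (a.1 < b.1) || (a.1 == b.1 && pvLt3 a.2 b.2)

def select_variant_key (results : List (String × List (String × Int))) : String :=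
  -- best_count = max(result["passed_count"] for result in results.values())  (ValueError on empty: excluded by Pre_)
  let best_count : Int := (PySem.List.max? (results.map pvCnt) (fun x => x)).getD 0
  -- results.get("ultimate_rrf", {}).get("passed_count")
  let ult : Option Int := (results.lookup "ultimate_rrf").bind (fun d => d.lookup "passed_count")
  if ult = some best_count then "ultimate_rrf"
  else
    -- max(results.items(), key=...) ported by hand (tuple key): Python's max keeps the FIRST
    -- maximal item — replace the running best only on a strictly greater key; exact
    match results with
    | [] => ""  -- unreachable: Python already raised ValueError above (excluded by Pre_)
    | h :: t => (t.foldl (fun best it => if pvLt4 (pvKeyA best) (pvKeyA it) then it else best) h).1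

-- ===== PORT B =====

-- B's rank: (passed_count, key=="ultimate_rrf", key=="coverage_patch", key=="iterative_coverage_loop", key)
def pvKeyB (it : String × List (String × Int)) : Int × Bool × Bool × Bool × String :=
  (pvCnt it, it.1 == "ultimate_rrf", pvTail3 it.1)

-- lexicographic '<' on B's 5-tuples
def pvLt5 (a b : Int × Bool × Bool × Bool × String) : Bool :=
  decide (a.1 < b.1) || (a.1 == b.1 && ((!a.2.1 && b.2.1) || (a.2.1 == b.2.1 && pvLt3 a.2.2 b.2.2)))

def select_variant_key_alt (results : List (String × List (String × Int))) : String :=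
  match results.foldl (fun acc it =>
      match acc with
      | none => some (it.1, pvKeyB it)
      | some best => if pvLt5 best.2 (pvKeyB it) then some (it.1, pvKeyB it) else some best) none with
  | some best => best.1
  | none => ""  -- Python B raises ValueError("empty results") here (excluded by Pre_)

-- ===== PRECONDITION & SPEC =====
-- Pre_ excludes: empty results and inner dicts without a "passed_count" key (A raises
-- ValueError resp. KeyError there), and association lists carrying the key "ultimate_rrf"
-- more than once — a duplicate outer key cannot occur in a Python dict, and on such lists
-- first-vs-last-occurrence behaviour of the two ports is an accidental corner.
def Pre_select_variant_key (results : List (String × List (String × Int))) : Prop :=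
  results ≠ [] ∧ (∀ p ∈ results, "passed_count" ∈ p.2.map Prod.fst) ∧
    (results.map Prod.fst).count "ultimate_rrf" ≤ 1
instance (results : List (String × List (String × Int))) : Decidable (Pre_select_variant_key results) := by
  unfold Pre_select_variant_key; infer_instance

def pvWitness_select_variant_key : (List (String × List (String × Int))) :=
  [("ultimate_rrf", [("passed_count", 2)]), ("coverage_patch", [("passed_count", 3)])]

def Spec_select_variant_key (results : List (String × List (String × Int))) (out : String) : Prop :=
  out = select_variant_key_alt results
instance (results : List (String × List (String × Int))) (out : String) : Decidable (Spec_select_variant_key results out) := by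
  unfold Spec_select_variant_key; infer_instance

-- ===== CLAIM (what is proved, stated in full; the proofs are below) =====
def Claim_equal_select_variant_key : Prop := ∀ (results : List (String × List (String × Int))), Dom_select_variant_key results → Pre_select_variant_key results → Spec_select_variant_key results (select_variant_key results)

-- ===== LEMMAS AND PROOFS =====

def pvTl (k : String) : Bool ×ₗ Bool ×ₗ String :=
  toLex ((k == "coverage_patch"), toLex ((k == "iterative_coverage_loop"), k))

def pvLexA (it : String × List (String × Int)) : Int ×ₗ Bool ×ₗ Bool ×ₗ String :=
  toLex (pvCnt it, pvTl it.1)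

def pvLexB (it : String × List (String × Int)) : Int ×ₗ Bool ×ₗ Bool ×ₗ Bool ×ₗ String :=
  toLex (pvCnt it, toLex ((it.1 == "ultimate_rrf"), pvTl it.1))

def pvSel {κ : Type} [LinearOrder κ] (key : (String × List (String × Int)) → κ)
    (h : String × List (String × Int)) (t : List (String × List (String × Int))) :
    String × List (String × Int) :=
  t.foldl (fun b it => if key b < key it then it else b) h

theorem pvLt3_iff (a b : Bool × Bool × String) :
    pvLt3 a b = true ↔ toLex (a.1, toLex (a.2.1, a.2.2)) < toLex (b.1, toLex (b.2.1, b.2.2)) := by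
  obtain ⟨a1, a2, a3⟩ := a; obtain ⟨b1, b2, b3⟩ := b
  simp [pvLt3, Prod.Lex.toLex_lt_toLex, Bool.lt_iff]

theorem pvLt4_bridge (x y : String × List (String × Int)) :
    pvLt4 (pvKeyA x) (pvKeyA y) = decide (pvLexA x < pvLexA y) := by
  simp only [pvLt4, pvKeyA, pvLexA, pvTl, pvTail3]
  rw [Bool.eq_iff_iff]
  simp [Prod.Lex.toLex_lt_toLex, pvLt3_iff, Bool.lt_iff]

theorem pvLt5_bridge (x y : String × List (String × Int)) :
    pvLt5 (pvKeyB x) (pvKeyB y) = decide (pvLexB x < pvLexB y) := by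
  simp only [pvLt5, pvKeyB, pvLexB, pvTl, pvTail3]
  rw [Bool.eq_iff_iff]
  simp [Prod.Lex.toLex_lt_toLex, pvLt3_iff, Bool.lt_iff]

theorem pvSel_mem {κ : Type} [LinearOrder κ] (key : (String × List (String × Int)) → κ)
    (t : List (String × List (String × Int))) (h : String × List (String × Int)) :
    pvSel key h t ∈ h :: t := by
  induction t generalizing h with
  | nil => simp [pvSel]
  | cons x t ih =>
    have := ih (if key h < key x then x else h)
    simp only [pvSel, List.foldl_cons] at this ⊢
    rcases List.mem_cons.1 this with h1 | h1
    · by_cases hc : key h < key x <;> simp only [hc, if_true, if_false] at h1 ⊢ <;> simp [h1]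
    · simp [List.mem_cons.2 (Or.inr (List.mem_cons.2 (Or.inr h1)))]

theorem pvSel_max {κ : Type} [LinearOrder κ] (key : (String × List (String × Int)) → κ)
    (t : List (String × List (String × Int))) (h : String × List (String × Int)) :
    ∀ x ∈ h :: t, key x ≤ key (pvSel key h t) := by
  induction t generalizing h with
  | nil => simp [pvSel]
  | cons x t ih =>
    intro y hy
    have step : pvSel key h (x :: t) = pvSel key (if key h < key x then x else h) t := rfl
    have hM := ih (if key h < key x then x else h)
    have hacc : key h ≤ key (if key h < key x then x else h) ∧ key x ≤ key (if key h < key x then x else h) := by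
      by_cases hc : key h < key x <;> simp [hc] <;> [exact le_of_lt hc; exact le_of_not_gt hc]
    have hle : key (if key h < key x then x else h) ≤ key (pvSel key (if key h < key x then x else h) t) :=
      hM _ (List.mem_cons_self)
    rw [step]
    rcases List.mem_cons.1 hy with rfl | hy
    · exact le_trans hacc.1 hle
    · rcases List.mem_cons.1 hy with rfl | hy
      · exact le_trans hacc.2 hle
      · exact hM _ (List.mem_cons.2 (Or.inr hy))

-- fold reductions

theorem pvFoldA_sel (t : List (String × List (String × Int))) (h : String × List (String × Int)) :
    t.foldl (fun best it => if pvLt4 (pvKeyA best) (pvKeyA it) then it else best) h = pvSel pvLexA h t := by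
  have he : (fun best it => if pvLt4 (pvKeyA best) (pvKeyA it) then it else best)
      = (fun (b it : String × List (String × Int)) => if pvLexA b < pvLexA it then it else b) := by
    funext b it; rw [pvLt4_bridge]; simp
  rw [he]; rfl

theorem pvFoldB_pair (t : List (String × List (String × Int))) (b : String × List (String × Int)) :
    t.foldl (fun acc it =>
      match acc with
      | none => some (it.1, pvKeyB it)
      | some best => if pvLt5 best.2 (pvKeyB it) then some (it.1, pvKeyB it) else some best)
      (some (b.1, pvKeyB b))
      = some ((pvSel pvLexB b t).1, pvKeyB (pvSel pvLexB b t)) := by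
  induction t generalizing b with
  | nil => simp [pvSel]
  | cons x t ih =>
    have hstep : pvSel pvLexB b (x :: t) = pvSel pvLexB (if pvLexB b < pvLexB x then x else b) t := rfl
    simp only [List.foldl_cons, pvLt5_bridge]
    by_cases hc : pvLexB b < pvLexB x
    · simpa [hstep, hc] using ih x
    · simpa [hstep, hc] using ih b

-- comparison corollaries

theorem pvA_lt_of_cnt (a b : String × List (String × Int)) (h : pvCnt a < pvCnt b) :
    pvLexA a < pvLexA b := by
  simp [pvLexA, Prod.Lex.toLex_lt_toLex]; exact Or.inl h

theorem pvCnt_le_of_A_le (a b : String × List (String × Int)) (h : pvLexA a ≤ pvLexA b) :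
    pvCnt a ≤ pvCnt b := by
  rcases lt_or_eq_of_le h with h | h
  · simp [pvLexA, Prod.Lex.toLex_lt_toLex] at h
    rcases h with h | ⟨h, _⟩ <;> omega
  · simp [pvLexA] at h; omega

theorem pvB_iff_A (a b : String × List (String × Int))
    (ha : a.1 ≠ "ultimate_rrf") (hb : b.1 ≠ "ultimate_rrf") :
    (pvLexB a < pvLexB b ↔ pvLexA a < pvLexA b) := by
  have h1 : (a.1 == "ultimate_rrf") = false := by simp [ha]
  have h2 : (b.1 == "ultimate_rrf") = false := by simp [hb]
  simp [pvLexB, pvLexA, Prod.Lex.toLex_lt_toLex, h1, h2]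

theorem pvB_ult_lt (u x : String × List (String × Int))
    (hu : u.1 = "ultimate_rrf") (hx : x.1 ≠ "ultimate_rrf") :
    (pvLexB u < pvLexB x ↔ pvCnt u < pvCnt x) := by
  have h1 : (u.1 == "ultimate_rrf") = true := by simp [hu]
  have h2 : (x.1 == "ultimate_rrf") = false := by simp [hx]
  simp [pvLexB, Prod.Lex.toLex_lt_toLex, h1, h2, Bool.lt_iff]

theorem pvB_lt_ult (a u : String × List (String × Int))
    (ha : a.1 ≠ "ultimate_rrf") (hu : u.1 = "ultimate_rrf") :
    (pvLexB a < pvLexB u ↔ pvCnt a ≤ pvCnt u) := by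
  have h1 : (a.1 == "ultimate_rrf") = false := by simp [ha]
  have h2 : (u.1 == "ultimate_rrf") = true := by simp [hu]
  simp [pvLexB, Prod.Lex.toLex_lt_toLex, h1, h2, Bool.lt_iff, le_iff_lt_or_eq]


-- the two folds agree step by step while no "ultimate_rrf" key is involved

theorem pvE (t : List (String × List (String × Int))) :
    ∀ a : String × List (String × Int), (∀ x ∈ t, x.1 ≠ "ultimate_rrf") → a.1 ≠ "ultimate_rrf" →
      pvSel pvLexB a t = pvSel pvLexA a t := by
  induction t with
  | nil => intro a _ _; rfl
  | cons x t ih =>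
    intro a hno ha
    have hx : x.1 ≠ "ultimate_rrf" := hno x List.mem_cons_self
    have hstep : ∀ {κ : Type} [LinearOrder κ] (key : (String × List (String × Int)) → κ),
        pvSel key a (x :: t) = pvSel key (if key a < key x then x else a) t := fun _ => rfl
    rw [hstep pvLexB, hstep pvLexA]
    by_cases hc : pvLexA a < pvLexA x
    · rw [if_pos hc, if_pos ((pvB_iff_A a x ha hx).2 hc)]
      exact ih x (fun y hy => hno y (List.mem_cons_of_mem _ hy)) hx
    · rw [if_neg hc, if_neg (fun h => hc ((pvB_iff_A a x ha hx).1 h))]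
      exact ih a (fun y hy => hno y (List.mem_cons_of_mem _ hy)) ha

-- divergent state: A carries a non-ult item of the same count, B carries the ult item

theorem pvD (t : List (String × List (String × Int))) :
    ∀ (a u : String × List (String × Int)), (∀ x ∈ t, x.1 ≠ "ultimate_rrf") →
      u.1 = "ultimate_rrf" → a.1 ≠ "ultimate_rrf" → pvCnt a = pvCnt u →
      (pvSel pvLexA a t = pvSel pvLexB u t ∨ pvCnt (pvSel pvLexA a t) = pvCnt u) := by
  induction t with
  | nil => intro a u _ _ _ hc; exact Or.inr hc
  | cons x t ih =>
    intro a u hno hu ha hc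
    have hx : x.1 ≠ "ultimate_rrf" := hno x List.mem_cons_self
    have hno' : ∀ y ∈ t, y.1 ≠ "ultimate_rrf" := fun y hy => hno y (List.mem_cons_of_mem _ hy)
    have hstep : ∀ {κ : Type} [LinearOrder κ] (key : (String × List (String × Int)) → κ) b,
        pvSel key b (x :: t) = pvSel key (if key b < key x then x else b) t := fun _ _ => rfl
    rw [hstep pvLexB u, hstep pvLexA a]
    by_cases hlt : pvCnt u < pvCnt x
    · rw [if_pos ((pvB_ult_lt u x hu hx).2 hlt), if_pos (pvA_lt_of_cnt a x (by omega))]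
      exact Or.inl ((pvE t x hno' hx).symm)
    · rw [if_neg (fun h => hlt ((pvB_ult_lt u x hu hx).1 h))]
      by_cases hA : pvLexA a < pvLexA x
      · rw [if_pos hA]
        have hcx : pvCnt x = pvCnt u := by
          have := pvCnt_le_of_A_le a x (le_of_lt hA); omega
        exact ih x u hno' hu hx hcx
      · rw [if_neg hA]
        exact ih a u hno' hu ha hc

-- both folds start on the unique ult item

theorem pvU (t : List (String × List (String × Int))) :
    ∀ u : String × List (String × Int), (∀ x ∈ t, x.1 ≠ "ultimate_rrf") → u.1 = "ultimate_rrf" →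
      (pvSel pvLexA u t = pvSel pvLexB u t ∨ pvCnt (pvSel pvLexA u t) = pvCnt u) := by
  induction t with
  | nil => intro u _ _; exact Or.inl rfl
  | cons x t ih =>
    intro u hno hu
    have hx : x.1 ≠ "ultimate_rrf" := hno x List.mem_cons_self
    have hno' : ∀ y ∈ t, y.1 ≠ "ultimate_rrf" := fun y hy => hno y (List.mem_cons_of_mem _ hy)
    have hstep : ∀ {κ : Type} [LinearOrder κ] (key : (String × List (String × Int)) → κ) b,
        pvSel key b (x :: t) = pvSel key (if key b < key x then x else b) t := fun _ _ => rfl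
    rw [hstep pvLexB u, hstep pvLexA u]
    by_cases hlt : pvCnt u < pvCnt x
    · rw [if_pos ((pvB_ult_lt u x hu hx).2 hlt), if_pos (pvA_lt_of_cnt u x hlt)]
      exact Or.inl ((pvE t x hno' hx).symm)
    · rw [if_neg (fun h => hlt ((pvB_ult_lt u x hu hx).1 h))]
      by_cases hA : pvLexA u < pvLexA x
      · rw [if_pos hA]
        have hcx : pvCnt x = pvCnt u := by
          have := pvCnt_le_of_A_le u x (le_of_lt hA); omega
        rcases pvD t x u hno' hu hx hcx with h | h
        · exact Or.inl h
        · exact Or.inr h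
      · rw [if_neg hA]
        exact ih u hno' hu

-- List.lookup facts

theorem pvLookup_none {β : Type} (l : List (String × β)) (a : String)
    (h : l.lookup a = none) : ∀ p ∈ l, p.1 ≠ a := by
  induction l with
  | nil => simp
  | cons x t ih =>
    obtain ⟨k, v⟩ := x
    rw [List.lookup_cons] at h
    by_cases h' : a == k
    · simp [h'] at h
    · simp only [h'] at h
      simp at h'
      intro p hp
      rcases List.mem_cons.1 hp with rfl | hp
      · simpa using fun h'' => h' h''.symm
      · exact ih h p hp

theorem pvLookup_mem {β : Type} (l : List (String × β)) (a : String) (b : β)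
    (h : l.lookup a = some b) : (a, b) ∈ l := by
  induction l with
  | nil => simp [List.lookup] at h
  | cons x t ih =>
    obtain ⟨k, v⟩ := x
    rw [List.lookup_cons] at h
    by_cases h' : a == k
    · simp [h'] at h; simp at h'; simp [h', h]
    · simp only [h'] at h
      exact List.mem_cons_of_mem _ (ih h)

theorem pvLookup_isSome {β : Type} (l : List (String × β)) (a : String)
    (h : a ∈ l.map Prod.fst) : (l.lookup a).isSome := by
  induction l with
  | nil => simp at h
  | cons x t ih =>
    obtain ⟨k, v⟩ := x
    rw [List.lookup_cons]
    by_cases h' : a == k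
    · simp [h']
    · simp only [h']
      simp at h h'
      rcases h with rfl | h
      · exact absurd rfl h'
      · exact ih (by simpa using h)

theorem pvAlt_eq (h : String × List (String × Int)) (t : List (String × List (String × Int))) :
    select_variant_key_alt (h :: t) = (pvSel pvLexB h t).1 := by
  have h1 : (h :: t).foldl (fun acc it =>
      match acc with
      | none => some (it.1, pvKeyB it)
      | some best => if pvLt5 best.2 (pvKeyB it) then some (it.1, pvKeyB it) else some best) none
      = some ((pvSel pvLexB h t).1, pvKeyB (pvSel pvLexB h t)) := by
    rw [List.foldl_cons]; exact pvFoldB_pair t h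
  unfold select_variant_key_alt
  rw [h1]

theorem pvMain (results : List (String × List (String × Int)))
    (hne : results ≠ []) (hpc : ∀ p ∈ results, "passed_count" ∈ p.2.map Prod.fst)
    (hcount : (results.map Prod.fst).count "ultimate_rrf" ≤ 1) :
    select_variant_key results = select_variant_key_alt results := by
  obtain ⟨h, t, rfl⟩ : ∃ h t, results = h :: t := by
    cases results with
    | nil => exact absurd rfl hne
    | cons a b => exact ⟨a, b, rfl⟩
  rw [pvAlt_eq]
  obtain ⟨m, hm⟩ : ∃ m, PySem.List.max? ((h :: t).map pvCnt) (fun x => x) = some m := by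
    cases hx : PySem.List.max? ((h :: t).map pvCnt) (fun x => x) with
    | none => exact absurd ((PySem.List.max?_eq_none_iff _ _).mp hx) (by simp)
    | some m => exact ⟨m, rfl⟩
  have hub : ∀ x ∈ h :: t, pvCnt x ≤ m := by
    intro x hx
    simpa using PySem.List.max?_isMax hm (pvCnt x) (List.mem_map_of_mem hx)
  have hlb : m ≤ pvCnt (pvSel pvLexA h t) := by
    have hmm := PySem.List.max?_mem hm
    obtain ⟨w, hw, hwe⟩ := List.mem_map.1 hmm
    have := pvCnt_le_of_A_le w (pvSel pvLexA h t) (pvSel_max pvLexA t h w hw)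
    omega
  simp only [select_variant_key, hm, Option.getD_some]
  by_cases hg : ((h :: t).lookup "ultimate_rrf").bind (fun d => d.lookup "passed_count") = some m
  · rw [if_pos hg]
    obtain ⟨d, hd1, hd2⟩ := Option.bind_eq_some_iff.1 hg
    have humem : ("ultimate_rrf", d) ∈ h :: t := pvLookup_mem _ _ _ hd1
    have hcu : pvCnt ("ultimate_rrf", d) = m := by simp [pvCnt, hd2]
    have hfm : pvSel pvLexB h t ∈ h :: t := pvSel_mem _ _ _
    have hmax := pvSel_max pvLexB t h ("ultimate_rrf", d) humem
    by_contra hne'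
    have hf1 : (pvSel pvLexB h t).1 ≠ "ultimate_rrf" := fun hh => hne' hh.symm
    have hflt : pvLexB (pvSel pvLexB h t) < pvLexB ("ultimate_rrf", d) :=
      (pvB_lt_ult _ _ hf1 rfl).2 (by have := hub _ hfm; omega)
    exact absurd (lt_of_le_of_lt hmax hflt) (lt_irrefl _)
  · rw [if_neg hg, pvFoldA_sel]
    cases hL : (h :: t).lookup "ultimate_rrf" with
    | none =>
      have hnoU : ∀ x ∈ h :: t, x.1 ≠ "ultimate_rrf" := pvLookup_none _ _ hL
      rw [pvE t h (fun y hy => hnoU y (List.mem_cons_of_mem _ hy)) (hnoU h List.mem_cons_self)]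
    | some d =>
      have humem : ("ultimate_rrf", d) ∈ h :: t := pvLookup_mem _ _ _ hL
      obtain ⟨c, hd2⟩ := Option.isSome_iff_exists.1
        (pvLookup_isSome d "passed_count" (hpc _ humem))
      have hcu : pvCnt ("ultimate_rrf", d) = c := by simp [pvCnt, hd2]
      have hcne : c ≠ m := fun he => hg (by rw [hL]; simp [hd2, he])
      have hclt : c < m := by
        have := hub _ humem; omega
      obtain ⟨p, s, hsplit⟩ := List.append_of_mem humem
      have hcnt1 := hcount
      rw [hsplit, List.map_append, List.count_append, List.map_cons, List.count_cons] at hcnt1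
      simp only [beq_self_eq_true, if_true] at hcnt1
      have hpz : ∀ x ∈ p, x.1 ≠ "ultimate_rrf" := by
        intro x hx he
        have : "ultimate_rrf" ∈ p.map Prod.fst := List.mem_map.2 ⟨x, hx, he⟩
        have := List.count_pos_iff.2 this
        omega
      have hsz : ∀ x ∈ s, x.1 ≠ "ultimate_rrf" := by
        intro x hx he
        have : "ultimate_rrf" ∈ s.map Prod.fst := List.mem_map.2 ⟨x, hx, he⟩
        have := List.count_pos_iff.2 this
        omega
      -- relate the two folds, splitting the list at the unique ult item
      have hrel : pvSel pvLexA h t = pvSel pvLexB h t ∨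
          pvCnt (pvSel pvLexA h t) = pvCnt ("ultimate_rrf", d) := by
        cases p with
        | nil =>
          obtain ⟨rfl, rfl⟩ : h = ("ultimate_rrf", d) ∧ t = s := by
            simpa using hsplit
          exact pvU _ _ hsz rfl
        | cons h' p' =>
          obtain ⟨rfl, rfl⟩ : h = h' ∧ t = p' ++ ("ultimate_rrf", d) :: s := by
            simpa using hsplit
          have hh1 : h.1 ≠ "ultimate_rrf" := hpz h List.mem_cons_self
          have hp' : ∀ x ∈ p', x.1 ≠ "ultimate_rrf" := fun x hx => hpz x (List.mem_cons_of_mem _ hx)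
          have hsplitSel : ∀ {κ : Type} [LinearOrder κ] (key : (String × List (String × Int)) → κ) (b : String × List (String × Int)),
              pvSel key b (p' ++ ("ultimate_rrf", d) :: s)
                = pvSel key (if key (pvSel key b p') < key ("ultimate_rrf", d) then ("ultimate_rrf", d) else pvSel key b p') s := by
            intro κ _ key b
            simp [pvSel, List.foldl_append]
          have hEp : pvSel pvLexB h p' = pvSel pvLexA h p' := pvE p' h hp' hh1
          have ha1mem : pvSel pvLexA h p' ∈ h :: p' := pvSel_mem _ _ _
          have ha1 : (pvSel pvLexA h p').1 ≠ "ultimate_rrf" := by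
            rcases List.mem_cons.1 ha1mem with he | he
            · rw [he]; exact hh1
            · exact hpz _ (List.mem_cons_of_mem _ he)
          rw [hsplitSel pvLexA h, hsplitSel pvLexB h, hEp]
          set a1 := pvSel pvLexA h p' with ha1def
          have hcbB : pvLexB a1 < pvLexB ("ultimate_rrf", d) ↔ pvCnt a1 ≤ c := by
            rw [pvB_lt_ult a1 _ ha1 rfl, hcu]
          rcases lt_trichotomy (pvCnt a1) c with h1 | h1 | h1
          · rw [if_pos (hcbB.2 (le_of_lt h1)), if_pos (pvA_lt_of_cnt a1 _ (by omega))]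
            exact pvU s _ hsz rfl
          · rw [if_pos (hcbB.2 (le_of_eq h1))]
            by_cases hA : pvLexA a1 < pvLexA ("ultimate_rrf", d)
            · rw [if_pos hA]
              exact pvU s _ hsz rfl
            · rw [if_neg hA]
              exact pvD s a1 _ hsz rfl ha1 (by omega)
          · have hnb : ¬ pvLexB a1 < pvLexB ("ultimate_rrf", d) := fun hh => by
              have := hcbB.1 hh; omega
            have hna : ¬ pvLexA a1 < pvLexA ("ultimate_rrf", d) := fun hh => by
              have := pvCnt_le_of_A_le a1 _ (le_of_lt hh); omega
            rw [if_neg hnb, if_neg hna]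
            exact Or.inl (pvE s a1 hsz ha1).symm
      rcases hrel with he | hc'
      · rw [he]
      · exfalso; omega

-- ===== VERDICT (by name: the statement is the Claim_ definition above) =====
theorem select_variant_key_spec : Claim_equal_select_variant_key := by
  intro results _ hpre
  unfold Spec_select_variant_key
  obtain ⟨hne, hpc, hcount⟩ := hpre
  exact pvMain results hne hpc hcount
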